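-- pv_equiv track=rewrite | github.com/Empreiteiro/langflow-factory | components/crm/hubspot/hubspot_integration.py | update_build_config
-- ===== SOURCE A (Python) =====
-- def update_build_config(build_config, field_value, field_name=None):
--     if field_name != "action":
--         return build_config
--
--     # Extract action name from the selected action
--     selected = [action["name"] for action in field_value] if isinstance(field_value, list) else []
--
--     field_map = {
--         "Create Deal": ["deal_properties"],
--         "Create Company": ["company_properties"],
--         "Create Contact": ["contact_properties"],
--         "Get Deal": ["deal_id"],
--         "Get Company": ["company_id"],
--         "Get Contact": ["contact_id"],
--         "List Deals": ["limit"],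
--         "List Companies": ["limit"],
--         "List Contacts": ["limit"],
--         "Search Deals": ["search_query", "limit"],
--         "Search Companies": ["search_query", "limit"],
--         "Search Contacts": ["search_query", "limit"],
--         "Update Deal": ["deal_id", "deal_properties"],
--         "Update Company": ["company_id", "company_properties"],
--         "Update Contact": ["contact_id", "contact_properties"],
--         "Delete Deal": ["deal_id"],
--         "Delete Company": ["company_id"],
--         "Delete Contact": ["contact_id"],
--         "Get Deal Properties": [],
--         "Get Company Properties": [],
--         "Get Contact Properties": [],
--     }
--
--     # Hide all dynamic fields first
--     for field_name in ["deal_properties", "company_properties", "contact_properties", "deal_id", "company_id", "contact_id", "search_query", "limit"]: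
--         if field_name in build_config:
--             build_config[field_name]["show"] = False
--
--     # Show fields based on selected action
--     if len(selected) == 1 and selected[0] in field_map:
--         for field_name in field_map[selected[0]]:
--             if field_name in build_config:
--                 build_config[field_name]["show"] = True
--
--     return build_config
-- ===== SOURCE B (Python) =====
-- def update_build_config(build_config, field_value, field_name=None):
--     if field_name != "action":
--         return build_config
--
--     selected = [action["name"] for action in field_value] if isinstance(field_value, list) else []
--
--     field_map = {
--         "Create Deal": ["deal_properties"],
--         "Create Company": ["company_properties"],
--         "Create Contact": ["contact_properties"],
--         "Get Deal": ["deal_id"],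
--         "Get Company": ["company_id"],
--         "Get Contact": ["contact_id"],
--         "List Deals": ["limit"],
--         "List Companies": ["limit"],
--         "List Contacts": ["limit"],
--         "Search Deals": ["search_query", "limit"],
--         "Search Companies": ["search_query", "limit"],
--         "Search Contacts": ["search_query", "limit"],
--         "Update Deal": ["deal_id", "deal_properties"],
--         "Update Company": ["company_id", "company_properties"],
--         "Update Contact": ["contact_id", "contact_properties"],
--         "Delete Deal": ["deal_id"],
--         "Delete Company": ["company_id"],
--         "Delete Contact": ["contact_id"],
--         "Get Deal Properties": [],
--         "Get Company Properties": [],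
--         "Get Contact Properties": [],
--     }
--
--     dynamic = {"deal_properties", "company_properties", "contact_properties",
--                "deal_id", "company_id", "contact_id", "search_query", "limit"}
--     show = set(field_map.get(selected[0], [])) if len(selected) == 1 else set()
--
--     # One pass over the config itself: each dynamic field gets its final visibility directly.
--     for field, cfg in build_config.items():
--         if field in dynamic:
--             cfg["show"] = field in show
--
--     return build_config
-- ===== Notes on version B (the rewrite author's own statement) =====
-- stated objective: simpler
-- what changed: Replaces A's two fixed-field-list passes (hide all eight dynamic fields, then re-show the selected action's fields) with a single pass over build_config itself that writes each dynamic field's final visibility once, computed from a precomputed show set.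
import Mathlib
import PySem

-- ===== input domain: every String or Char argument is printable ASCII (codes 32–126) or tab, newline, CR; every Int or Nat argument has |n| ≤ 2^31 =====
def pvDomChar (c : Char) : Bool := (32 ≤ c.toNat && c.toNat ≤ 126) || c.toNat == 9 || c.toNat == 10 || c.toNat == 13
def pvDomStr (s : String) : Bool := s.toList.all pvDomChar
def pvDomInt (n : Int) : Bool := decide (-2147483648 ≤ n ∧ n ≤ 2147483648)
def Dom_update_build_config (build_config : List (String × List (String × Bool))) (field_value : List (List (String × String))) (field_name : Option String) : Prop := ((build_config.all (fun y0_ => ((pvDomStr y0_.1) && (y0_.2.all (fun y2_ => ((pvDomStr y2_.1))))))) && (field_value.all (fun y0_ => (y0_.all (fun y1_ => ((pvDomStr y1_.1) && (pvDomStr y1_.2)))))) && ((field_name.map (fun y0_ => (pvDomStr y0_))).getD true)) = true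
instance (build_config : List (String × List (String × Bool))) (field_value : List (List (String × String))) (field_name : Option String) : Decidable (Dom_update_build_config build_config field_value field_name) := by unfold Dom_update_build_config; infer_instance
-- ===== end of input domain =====

-- B replaces A's hide-all-then-show-some double pass over the fixed field lists with a single
-- pass over build_config itself (objective: simpler).  Both Pythons mutate build_config in
-- place and return it; B performs the same mutation, and the theorems are about the return value.

-- ===== PORT A =====
-- the eight dynamic fields A hides first (the literal list of A's first loop)
def pvHideFields : List String :=
  ["deal_properties", "company_properties", "contact_properties", "deal_id", "company_id",
   "contact_id", "search_query", "limit"]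

-- A's field_map literal (both Pythons contain the identical literal)
def pvFieldMap : PySem.Dict String (List String) := PySem.Dict.mk
  [("Create Deal", ["deal_properties"]),
   ("Create Company", ["company_properties"]),
   ("Create Contact", ["contact_properties"]),
   ("Get Deal", ["deal_id"]),
   ("Get Company", ["company_id"]),
   ("Get Contact", ["contact_id"]),
   ("List Deals", ["limit"]),
   ("List Companies", ["limit"]),
   ("List Contacts", ["limit"]),
   ("Search Deals", ["search_query", "limit"]),
   ("Search Companies", ["search_query", "limit"]),
   ("Search Contacts", ["search_query", "limit"]),
   ("Update Deal", ["deal_id", "deal_properties"]),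
   ("Update Company", ["company_id", "company_properties"]),
   ("Update Contact", ["contact_id", "contact_properties"]),
   ("Delete Deal", ["deal_id"]),
   ("Delete Company", ["company_id"]),
   ("Delete Contact", ["contact_id"]),
   ("Get Deal Properties", []),
   ("Get Company Properties", []),
   ("Get Contact Properties", [])]

-- "if field in build_config: build_config[field]['show'] = v"  (both Pythons contain this line)
def pvSetShow (d : PySem.Dict String (PySem.Dict String Bool)) (f : String) (v : Bool) :
    PySem.Dict String (PySem.Dict String Bool) :=
  match d.get? f with
  | some inner => d.insert f (inner.insert "show" v)
  | none => d

-- selected = [action["name"] for action in field_value]; none = Python's KeyError (excluded by Pre_)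
def pvSelected? (field_value : List (List (String × String))) : Option (List String) :=
  field_value.mapM (fun a => (PySem.Dict.mk a).get? "name")

def update_build_config (build_config : List (String × List (String × Bool))) (field_value : List (List (String × String))) (field_name : Option String) : List (String × List (String × Bool)) :=
  if field_name ≠ some "action" then build_config
  else
    match pvSelected? field_value with
    | none => build_config  -- Python raises KeyError here; Pre_ excludes these inputs
    | some selected =>
      let d0 := PySem.Dict.mk (build_config.map (fun p => (p.1, PySem.Dict.mk p.2)))
      -- Hide all dynamic fields first
      let d1 := pvHideFields.foldl (fun d f => pvSetShow d f false) d0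
      -- Show fields based on selected action
      let d2 :=
        match selected with
        | [s] =>
          match pvFieldMap.get? s with
          | some fs => fs.foldl (fun d f => pvSetShow d f true) d1
          | none => d1
        | _ => d1
      d2.items.map (fun p => (p.1, p.2.items))

-- ===== PORT B =====
-- dynamic = {...} (B's set literal of the eight dynamic fields)
def pvDynamicSet : PySem.Set String := PySem.Set.ofList
  ["deal_properties", "company_properties", "contact_properties", "deal_id", "company_id",
   "contact_id", "search_query", "limit"]

def update_build_config_alt (build_config : List (String × List (String × Bool))) (field_value : List (List (String × String))) (field_name : Option String) : List (String × List (String × Bool)) :=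
  if field_name ≠ some "action" then build_config
  else
    match pvSelected? field_value with
    | none => build_config  -- same KeyError as A; Pre_ excludes these inputs
    | some selected =>
      -- show = set(field_map.get(selected[0], [])) if len(selected) == 1 else set()
      let show_ : PySem.Set String :=
        if selected.length = 1 then
          PySem.Set.ofList ((((PySem.List.pyGet? selected 0).bind pvFieldMap.get?).getD []))
        else PySem.Set.ofList []
      -- One pass over the config itself: each dynamic field gets its final visibility directly
      build_config.map (fun p =>
        if pvDynamicSet.contains p.1 then
          (p.1, ((PySem.Dict.mk p.2).insert "show" (show_.contains p.1)).items)
        else p)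

-- ===== PRECONDITION & SPEC =====
-- Pre_ excludes (a) inputs where Python A raises KeyError (an action dict without a "name" key
-- when field_name == "action"), and (b) association lists with duplicate keys in any dict
-- position — those cannot arise from a Python dict, so first-match assoc-list semantics on them
-- is an artefact of the encoding, not a behaviour of A.
def Pre_update_build_config (build_config : List (String × List (String × Bool))) (field_value : List (List (String × String))) (field_name : Option String) : Prop :=
  (build_config.map Prod.fst).Nodup ∧
  (∀ p ∈ build_config, (p.2.map Prod.fst).Nodup) ∧
  (∀ a ∈ field_value, (a.map Prod.fst).Nodup) ∧
  (field_name = some "action" → ∀ a ∈ field_value, "name" ∈ a.map Prod.fst)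
instance (build_config : List (String × List (String × Bool))) (field_value : List (List (String × String))) (field_name : Option String) : Decidable (Pre_update_build_config build_config field_value field_name) := by unfold Pre_update_build_config; infer_instance

def pvWitness_update_build_config : (List (String × List (String × Bool))) × (List (List (String × String))) × Option String :=
  ([("deal_id", [("show", false)]), ("limit", [("show", true)]), ("other", [])],
   [[("name", "Get Deal")]], some "action")

def Spec_update_build_config (build_config : List (String × List (String × Bool))) (field_value : List (List (String × String))) (field_name : Option String) (out : List (String × List (String × Bool))) : Prop := out = update_build_config_alt build_config field_value field_name
instance (build_config : List (String × List (String × Bool))) (field_value : List (List (String × String))) (field_name : Option String) (out : List (String × List (String × Bool))) : Decidable (Spec_update_build_config build_config field_value field_name out) := by unfold Spec_update_build_config; infer_instance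

-- ===== CLAIM (what is proved, stated in full; the proofs are below) =====
def Claim_equal_update_build_config : Prop := ∀ (build_config : List (String × List (String × Bool))) (field_value : List (List (String × String))) (field_name : Option String), Dom_update_build_config build_config field_value field_name → Pre_update_build_config build_config field_value field_name → Spec_update_build_config build_config field_value field_name (update_build_config build_config field_value field_name)

-- ===== LEMMAS AND PROOFS =====

lemma pvSetShow_keys (d : PySem.Dict String (PySem.Dict String Bool)) (f : String) (v : Bool) :
    (pvSetShow d f v).keys = d.keys := by
  cases h : d.get? f with
  | none => simp only [pvSetShow, h]
  | some inner =>
    simp only [pvSetShow, h]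
    have hc : d.contains f = true := by rw [PySem.Dict.contains_eq_isSome_get?, h]; rfl
    simp only [PySem.Dict.keys, PySem.Dict.items_insert_of_contains d _ hc, List.map_map]
    refine List.map_congr_left ?_
    intro p _
    by_cases hp : p.1 = f <;> simp [hp]

lemma pvSetShow_items (d : PySem.Dict String (PySem.Dict String Bool)) (f : String) (v : Bool)
    (hnd : d.keys.Nodup) :
    (pvSetShow d f v).items
      = d.items.map (fun p => if p.1 = f then (p.1, p.2.insert "show" v) else p) := by
  cases h : d.get? f with
  | none =>
    simp only [pvSetShow, h]
    have hk : f ∉ d.keys := (PySem.Dict.get?_eq_none_iff_not_mem_keys d f).mp h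
    refine ((List.map_congr_left ?_).trans (List.map_id _)).symm
    intro p hp
    have : p.1 ≠ f := by
      intro e; exact hk (e ▸ (PySem.Dict.mem_keys_of_mem_items d hp))
    simp [this]
  | some inner =>
    simp only [pvSetShow, h]
    have hc : d.contains f = true := by rw [PySem.Dict.contains_eq_isSome_get?, h]; rfl
    rw [PySem.Dict.items_insert_of_contains d _ hc]
    refine List.map_congr_left ?_
    intro p hp
    by_cases hp1 : p.1 = f
    · have hm : (f, p.2) ∈ d.items := by
        rw [← hp1]; exact (Prod.mk.eta (p := p)) ▸ hp
      have := PySem.Dict.get?_of_mem_items d hm hnd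
      rw [h] at this
      simp [hp1, (Option.some.injEq _ _ ▸ this : inner = p.2)]
    · simp [hp1]

lemma pvFoldl_setShow_items (L : List String) (c : String → Bool) :
    ∀ (d : PySem.Dict String (PySem.Dict String Bool)), L.Nodup → d.keys.Nodup →
    (L.foldl (fun d f => pvSetShow d f (c f)) d).items
      = d.items.map (fun p => if p.1 ∈ L then (p.1, p.2.insert "show" (c p.1)) else p) := by
  induction L with
  | nil => intro d _ _; simp
  | cons f L' ih =>
    intro d hL hnd
    have hfL : f ∉ L' := (List.nodup_cons.mp hL).1
    have hL' : L'.Nodup := (List.nodup_cons.mp hL).2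
    have hnd' : (pvSetShow d f (c f)).keys.Nodup := by rw [pvSetShow_keys]; exact hnd
    rw [List.foldl_cons, ih _ hL' hnd', pvSetShow_items d f (c f) hnd, List.map_map]
    refine List.map_congr_left ?_
    intro p _
    by_cases hp : p.1 = f
    · simp [Function.comp, hp, hfL]
    · by_cases hp2 : p.1 ∈ L' <;> simp [Function.comp, hp, hp2]

lemma pvFieldMap_sub (s : String) (fs : List String) (h : pvFieldMap.get? s = some fs) :
    fs.Nodup ∧ ∀ f ∈ fs, f ∈ pvHideFields := by
  have hm : (s, fs) ∈ pvFieldMap.items :=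
    (PySem.Dict.get?_eq_some_iff_mem_items pvFieldMap s fs (by decide)).mp h
  have h2 : fs ∈ ([["deal_properties"], ["company_properties"], ["contact_properties"],
      ["deal_id"], ["company_id"], ["contact_id"], ["limit"], ["limit"], ["limit"],
      ["search_query", "limit"], ["search_query", "limit"], ["search_query", "limit"],
      ["deal_id", "deal_properties"], ["company_id", "company_properties"],
      ["contact_id", "contact_properties"], ["deal_id"], ["company_id"], ["contact_id"],
      [], [], []] : List (List String)) := by
    simpa [pvFieldMap, PySem.Dict.items] using List.mem_map_of_mem (f := Prod.snd) hm
  fin_cases h2 <;> exact ⟨by decide, by decide⟩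

lemma pvFoldl_setShow_keys (L : List String) (c : String → Bool)
    (d : PySem.Dict String (PySem.Dict String Bool)) :
    (L.foldl (fun d f => pvSetShow d f (c f)) d).keys = d.keys := by
  induction L generalizing d with
  | nil => rfl
  | cons f L' ih => rw [List.foldl_cons, ih, pvSetShow_keys]

lemma pvMain_eq (bc : List (String × List (String × Bool))) (fs : List String)
    (hnd : (bc.map Prod.fst).Nodup) (hfs : fs.Nodup) (hsub : ∀ f ∈ fs, f ∈ pvHideFields) :
    ((fs.foldl (fun d f => pvSetShow d f true)
        (pvHideFields.foldl (fun d f => pvSetShow d f false)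
          (PySem.Dict.mk (bc.map (fun p => (p.1, PySem.Dict.mk p.2)))))).items).map
      (fun p => (p.1, p.2.items))
    = bc.map (fun p =>
        if pvDynamicSet.contains p.1 then
          (p.1, ((PySem.Dict.mk p.2).insert "show" ((PySem.Set.ofList fs).contains p.1)).items)
        else p) := by
  have hdyn : pvDynamicSet = pvHideFields := by decide
  have hnd0 : (PySem.Dict.mk (bc.map (fun p => (p.1, PySem.Dict.mk p.2)))).keys.Nodup := by
    simpa [PySem.Dict.keys_mk, List.map_map, Function.comp] using hnd
  have hnd1 : (pvHideFields.foldl (fun d f => pvSetShow d f false)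
      (PySem.Dict.mk (bc.map (fun p => (p.1, PySem.Dict.mk p.2))))).keys.Nodup := by
    rw [pvFoldl_setShow_keys]; exact hnd0
  rw [pvFoldl_setShow_items fs _ _ hfs hnd1,
      pvFoldl_setShow_items pvHideFields _ _ (by decide) hnd0]
  show ((((bc.map _).map _).map _).map _) = _
  simp only [List.map_map]
  refine List.map_congr_left ?_
  intro p _
  simp only [Function.comp]
  by_cases hmem : p.1 ∈ pvHideFields
  · by_cases hshow : p.1 ∈ fs
    · simp [hmem, hshow, hdyn, PySem.Dict.insert_insert_self, PySem.Set.mem_ofList]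
    · simp [hmem, hshow, hdyn, PySem.Set.mem_ofList]
  · have : p.1 ∉ fs := fun hx => hmem (hsub _ hx)
    simp [hmem, this, hdyn]

lemma pvSelected?_some (fv : List (List (String × String)))
    (h : ∀ a ∈ fv, "name" ∈ a.map Prod.fst) : ∃ sel, pvSelected? fv = some sel := by
  induction fv with
  | nil => exact ⟨[], rfl⟩
  | cons a t ih =>
    obtain ⟨sel, hs⟩ := ih (fun b hb => h b (List.mem_cons_of_mem _ hb))
    have hv : ∃ v, (PySem.Dict.mk a).get? "name" = some v := by
      cases hg : (PySem.Dict.mk a).get? "name" with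
      | some v => exact ⟨v, rfl⟩
      | none =>
        exact absurd ((PySem.Dict.get?_eq_none_iff_not_mem_keys _ _).mp hg)
          (by simpa [PySem.Dict.keys_mk] using h a (List.mem_cons_self))
    obtain ⟨v, hvv⟩ := hv
    refine ⟨v :: sel, ?_⟩
    simp only [pvSelected?] at hs
    simp [pvSelected?, List.mapM_cons, hvv, hs]

-- ===== VERDICT (by name: the statement is the Claim_ definition above) =====
theorem update_build_config_spec : Claim_equal_update_build_config := by
  intro bc fv fn _ hpre
  obtain ⟨hnd, -, -, hname⟩ := hpre
  unfold Spec_update_build_config update_build_config update_build_config_alt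
  by_cases hfn : fn = some "action"
  · rw [if_neg (by simp [hfn]), if_neg (by simp [hfn])]
    obtain ⟨sel, hsel⟩ := pvSelected?_some fv (hname hfn)
    rw [hsel]
    rcases sel with _ | ⟨s, _ | ⟨b, t⟩⟩
    · simpa using pvMain_eq bc [] hnd (by decide) (by simp)
    · cases hg : pvFieldMap.get? s with
      | some fs =>
        obtain ⟨h1, h2⟩ := pvFieldMap_sub s fs hg
        simpa [hg, PySem.List.pyGet?, PySem.List.pyIdx?] using pvMain_eq bc fs hnd h1 h2
      | none => simpa [hg, PySem.List.pyGet?, PySem.List.pyIdx?] using pvMain_eq bc [] hnd (by decide) (by simp)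
    · simpa using pvMain_eq bc [] hnd (by decide) (by simp)
  · rw [if_pos (by simp [hfn]), if_pos (by simp [hfn])]
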